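-- pv_equiv track=rewrite | github.com/AbdielCC/Modelado-y-Programacion | Practica2/1257.py | calcular_hash
-- ===== SOURCE A (Python) =====
-- def calcular_hash(cadenas):
--     hash_total = 0
--     for indice_cadena, cadena in enumerate(cadenas):
--         hash_cadena = 0
--         for posicion, caracter in enumerate(cadena):
--             valor_letra = ord(caracter) - ord('A')
--             hash_cadena += valor_letra + posicion + indice_cadena
--         hash_total += hash_cadena
--     return hash_total
-- ===== SOURCE B (Python) =====
-- def calcular_hash(cadenas):
--     total = 0
--     for idx, cadena in enumerate(cadenas):
--         L = len(cadena)
--         letras = sum(ord(c) for c in cadena)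
--         total += letras - 65 * L + L * (L - 1) // 2 + L * idx
--     return total
-- ===== Notes on version B (the rewrite author's own statement) =====
-- stated objective: alternative
-- what changed: The inner per-position accumulation of 'posicion' and 'indice_cadena' is replaced by closed-form arithmetic (triangular number L*(L-1)//2 and L*idx) added once per string; only the mandatory character-value scan remains.
import Mathlib
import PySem

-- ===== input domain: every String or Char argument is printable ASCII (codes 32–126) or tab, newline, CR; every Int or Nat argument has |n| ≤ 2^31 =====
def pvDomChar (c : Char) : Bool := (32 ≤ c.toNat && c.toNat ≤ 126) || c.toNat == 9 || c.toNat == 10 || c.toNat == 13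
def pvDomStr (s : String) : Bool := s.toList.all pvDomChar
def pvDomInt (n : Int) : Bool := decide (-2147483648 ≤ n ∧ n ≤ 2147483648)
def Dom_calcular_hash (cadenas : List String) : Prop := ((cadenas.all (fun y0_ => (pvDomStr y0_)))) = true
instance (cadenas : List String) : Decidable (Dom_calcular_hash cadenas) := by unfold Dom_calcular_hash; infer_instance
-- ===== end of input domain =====

-- B replaces A's inner per-position accumulation with the closed-form triangular/linear offsets (alternative decomposition, same cost).


-- ===== PORT A =====
def calcular_hash (cadenas : List String) : Int :=
  (PySem.List.enumerate cadenas 0).foldl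
    (fun hash_total ic =>
      hash_total +
        (PySem.List.enumerate ic.2.toList 0).foldl
          (fun hash_cadena pc =>
            hash_cadena + (((pc.2.toNat : Int) - 65) + pc.1 + ic.1)) 0)
    0

-- ===== PORT B =====
def calcular_hash_alt (cadenas : List String) : Int :=
  (PySem.List.enumerate cadenas 0).foldl
    (fun total ic =>
      let L : Int := (ic.2.toList.length : Int)
      let letras : Int := ic.2.toList.foldl (fun s c => s + (c.toNat : Int)) 0
      total + (letras - 65 * L + PySem.Int.floordiv (L * (L - 1)) 2 + L * ic.1))
    0

-- ===== PRECONDITION & SPEC =====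
def Spec_calcular_hash (cadenas : List String) (out : Int) : Prop := out = calcular_hash_alt cadenas
instance (cadenas : List String) (out : Int) : Decidable (Spec_calcular_hash cadenas out) := by unfold Spec_calcular_hash; infer_instance

-- ===== CLAIM (what is proved, stated in full; the proofs are below) =====
def Claim_equal_calcular_hash : Prop := ∀ (cadenas : List String), Dom_calcular_hash cadenas → Spec_calcular_hash cadenas (calcular_hash cadenas)

-- ===== LEMMAS AND PROOFS =====

-- ===== VERDICT (by name: the statement is the Claim_ definition above) =====
-- triangular number 0+1+…+(n-1)
def pvTri : Nat → Int
  | 0 => 0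
  | n + 1 => pvTri n + n

theorem pvTri_eq_floordiv (n : Nat) :
    pvTri n = PySem.Int.floordiv ((n : Int) * ((n : Int) - 1)) 2 := by
  rw [PySem.Int.floordiv_eq_ediv_of_pos (by norm_num)]
  induction n with
  | zero => simp [pvTri]
  | succ m ih =>
      have h : ((m + 1 : Nat) : Int) * (((m + 1 : Nat) : Int) - 1)
          = (m : Int) * ((m : Int) - 1) + 2 * (m : Int) := by push_cast; ring
      rw [pvTri, ih, h]
      generalize (m : Int) * ((m : Int) - 1) = k
      omega

theorem pvCharSum_shift (xs : List Char) (a : Int) :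
    xs.foldl (fun s c => s + (c.toNat : Int)) a
      = a + xs.foldl (fun s c => s + (c.toNat : Int)) 0 := by
  induction xs generalizing a with
  | nil => simp
  | cons c t ih =>
      simp only [List.foldl_cons]
      rw [ih (a + c.toNat), ih ((0 : Int) + c.toNat)]
      ring

theorem pvInner (xs : List Char) (idx p acc : Int) :
    (PySem.List.enumerate xs p).foldl
        (fun hc pc => hc + (((pc.2.toNat : Int) - 65) + pc.1 + idx)) acc
      = acc + xs.foldl (fun s c => s + (c.toNat : Int)) 0
          + (xs.length : Int) * (idx - 65 + p) + pvTri xs.length := by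
  induction xs generalizing p acc with
  | nil => simp [PySem.List.enumerate_nil, pvTri]
  | cons c t ih =>
      rw [PySem.List.enumerate_cons]
      simp only [List.foldl_cons, List.length_cons]
      rw [ih (p + 1) (acc + ((c.toNat : Int) - 65 + p + idx))]
      rw [pvCharSum_shift t ((0 : Int) + c.toNat)]
      simp only [pvTri]
      push_cast
      ring

theorem pvOuter (cs : List String) (i acc : Int) :
    (PySem.List.enumerate cs i).foldl
        (fun hash_total ic =>
          hash_total +
            (PySem.List.enumerate ic.2.toList 0).foldl
              (fun hash_cadena pc =>
                hash_cadena + (((pc.2.toNat : Int) - 65) + pc.1 + ic.1)) 0) acc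
      = (PySem.List.enumerate cs i).foldl
        (fun total ic =>
          let L : Int := (ic.2.toList.length : Int)
          let letras : Int := ic.2.toList.foldl (fun s c => s + (c.toNat : Int)) 0
          total + (letras - 65 * L + PySem.Int.floordiv (L * (L - 1)) 2 + L * ic.1)) acc := by
  induction cs generalizing i acc with
  | nil => rfl
  | cons s t ih =>
      rw [PySem.List.enumerate_cons]
      simp only [List.foldl_cons]
      rw [ih]
      congr 1
      rw [pvInner s.toList i 0 0]
      rw [← pvTri_eq_floordiv s.toList.length]
      ring

theorem calcular_hash_spec : Claim_equal_calcular_hash := by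
  intro cadenas _
  unfold Spec_calcular_hash calcular_hash calcular_hash_alt
  exact pvOuter cadenas 0 0
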